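-- pv_equiv track=rewrite | github.com/cqxzy/batch-image-renamer | changename3.py | is_messy_name
-- ===== SOURCE A (Python) =====
-- def is_messy_name(stem: str) -> bool:
--     if not stem:
--         return False
--
--     if len(stem) >= 24:
--         return True
--
--     weird_symbols = set("!*=+@#$%^&()[]{};,'`~<>|\\")
--     if any(c in weird_symbols for c in stem):
--         return True
--
--     common_seps = set("_-. ")
--     non_alnum = sum(1 for c in stem if (not c.isalnum()) and (c not in common_seps))
--     if non_alnum >= 3:
--         return True
--
--     has_sep = any(c in stem for c in "_-. ")
--     if (not has_sep) and len(stem) >= 18: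
--         has_digit = any(c.isdigit() for c in stem)
--         has_alpha = any(c.isalpha() for c in stem)
--         if has_digit and has_alpha:
--             return True
--
--     return False
-- ===== SOURCE B (Python) =====
-- def is_messy_name(stem: str) -> bool:
--     if not stem:
--         return False
--     has_weird = has_sep = has_digit = has_alpha = False
--     non_alnum = 0
--     for c in stem:
--         if c in "!*=+@#$%^&()[]{};,'`~<>|\\":
--             has_weird = True
--         if c in "_-. ":
--             has_sep = True
--         elif not c.isalnum():
--             non_alnum += 1
--         if c.isdigit():
--             has_digit = True
--         if c.isalpha():
--             has_alpha = True
--     return (len(stem) >= 24 or has_weird or non_alnum >= 3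
--             or (not has_sep and len(stem) >= 18 and has_digit and has_alpha))
-- ===== Notes on version B (the rewrite author's own statement) =====
-- stated objective: simpler
-- what changed: Replaces A's early-return chain of four separate any()/sum() scans (one of them re-scanning the whole stem per separator character) with a single explicit loop that maintains five accumulators and one final boolean expression.
import Mathlib
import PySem

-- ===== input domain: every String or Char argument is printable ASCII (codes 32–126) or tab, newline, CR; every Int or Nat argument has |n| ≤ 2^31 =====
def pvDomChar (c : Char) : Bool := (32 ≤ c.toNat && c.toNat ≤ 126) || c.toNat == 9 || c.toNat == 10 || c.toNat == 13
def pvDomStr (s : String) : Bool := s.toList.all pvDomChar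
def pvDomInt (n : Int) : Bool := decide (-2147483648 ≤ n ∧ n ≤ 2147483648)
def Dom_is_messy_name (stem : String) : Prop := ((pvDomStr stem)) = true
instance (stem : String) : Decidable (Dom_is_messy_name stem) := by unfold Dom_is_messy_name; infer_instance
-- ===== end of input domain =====

-- B replaces A's chain of four separate any()/sum() scans by one loop maintaining five
-- accumulators and a single final boolean expression (objective: simpler, same O(n) cost).

-- ===== PORT A =====
def is_messy_name (stem : String) : Bool :=
  let cs := stem.toList
  if cs = [] then false
  else if 24 ≤ cs.length then true
  else
    let weird : PySem.Set Char := PySem.Set.ofList "!*=+@#$%^&()[]{};,'`~<>|\\".toList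
    if cs.any (fun c => PySem.Set.contains weird c) then true
    else
      let seps : PySem.Set Char := PySem.Set.ofList "_-. ".toList
      let nonAlnum : Int :=
        (cs.map (fun c => if (!PySem.Chars.isalnum c) && (!PySem.Set.contains seps c) then (1:Int) else 0)).sum
      if 3 ≤ nonAlnum then true
      else
        let hasSep := "_-. ".toList.any (fun c => PySem.Chars.isIn [c] cs)
        if (!hasSep) && 18 ≤ cs.length then
          cs.any PySem.Chars.isdigit && cs.any PySem.Chars.isalpha
        else false

-- ===== PORT B =====
-- one step of B's loop: update (has_weird, has_sep, has_digit, has_alpha, non_alnum)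
def pvStep (st : Bool × Bool × Bool × Bool × Int) (c : Char) : Bool × Bool × Bool × Bool × Int :=
  let (w, s, d, a, n) := st
  ( w || "!*=+@#$%^&()[]{};,'`~<>|\\".toList.contains c
  , s || "_-. ".toList.contains c
  , d || PySem.Chars.isdigit c
  , a || PySem.Chars.isalpha c
  , if "_-. ".toList.contains c then n
    else if !PySem.Chars.isalnum c then n + 1 else n )

def is_messy_name_alt (stem : String) : Bool :=
  let cs := stem.toList
  if cs = [] then false
  else
    let (w, s, d, a, n) := cs.foldl pvStep (false, false, false, false, 0)
    24 ≤ cs.length || w || 3 ≤ n || (!s && (18 ≤ cs.length) && d && a)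

-- ===== PRECONDITION & SPEC =====
def Spec_is_messy_name (stem : String) (out : Bool) : Prop := out = is_messy_name_alt stem
instance (stem : String) (out : Bool) : Decidable (Spec_is_messy_name stem out) := by unfold Spec_is_messy_name; infer_instance

-- ===== CLAIM (what is proved, stated in full; the proofs are below) =====
def Claim_equal_is_messy_name : Prop := ∀ (stem : String), Dom_is_messy_name stem → Spec_is_messy_name stem (is_messy_name stem)

-- ===== LEMMAS AND PROOFS =====

-- B's fold computes exactly the four 'any's and the 0/1-sum that A computes separately.
theorem pvFold_spec (cs : List Char) (w s d a : Bool) (n : Int) :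
    cs.foldl pvStep (w, s, d, a, n) =
      ( w || cs.any (fun c => "!*=+@#$%^&()[]{};,'`~<>|\\".toList.contains c)
      , s || cs.any (fun c => "_-. ".toList.contains c)
      , d || cs.any PySem.Chars.isdigit
      , a || cs.any PySem.Chars.isalpha
      , n + ((cs.map (fun c => if (!PySem.Chars.isalnum c) && !("_-. ".toList.contains c) then (1:Int) else 0)).sum) ) := by
  induction cs generalizing w s d a n with
  | nil => simp
  | cons c cs ih =>
    simp only [List.foldl_cons, pvStep, List.any_cons, List.map_cons, List.sum_cons]
    rw [ih]
    refine Prod.ext (by simp [Bool.or_assoc]) (Prod.ext (by simp [Bool.or_assoc])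
      (Prod.ext (by simp [Bool.or_assoc]) (Prod.ext (by simp [Bool.or_assoc]) ?_)))
    rcases hs : ("_-. ".toList.contains c) with _ | _ <;>
      rcases ha : (PySem.Chars.isalnum c) with _ | _ <;>
        simp only [hs, ha, Bool.not_false, Bool.not_true, Bool.and_true, Bool.and_false,
          Bool.true_and, Bool.false_and, Bool.false_eq_true, Bool.true_eq_false, if_true, if_false] <;> ring

theorem pvSingleton_isIn_iff (c : Char) (cs : List Char) :
    PySem.Chars.isIn [c] cs = cs.contains c := by
  rcases h : PySem.Chars.isIn [c] cs with _ | _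
  · rw [PySem.Chars.isIn_eq_false_iff] at h
    symm
    simp only [List.contains_eq_mem, decide_eq_false_iff_not]
    intro hmem
    obtain ⟨s, t, hst⟩ := List.mem_iff_append.mp hmem
    exact h ⟨s, t, by simp [hst]⟩
  · rw [PySem.Chars.isIn_iff_infix] at h
    symm
    simp only [List.contains_eq_mem, decide_eq_true_eq]
    exact h.mem (by simp)

-- membership scans commute: any c in l with c ∈ cs  =  any c in cs with c ∈ l
theorem pvAny_mem_comm (l cs : List Char) :
    (l.any fun c => cs.contains c) = cs.any (fun c => l.contains c) := by
  rw [Bool.eq_iff_iff, List.any_eq_true, List.any_eq_true]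
  constructor
  · rintro ⟨c, h1, h2⟩
    exact ⟨c, by simpa using h2, by simpa using h1⟩
  · rintro ⟨c, h1, h2⟩
    exact ⟨c, by simpa using h2, by simpa using h1⟩

theorem pvCombine (L : Nat) (W S D A : Bool) (N : Int) :
    (if 24 ≤ L then true
     else if W = true then true
     else if 3 ≤ N then true
     else if (!S && decide (18 ≤ L)) = true then D && A
     else false)
    = (decide (24 ≤ L) || W || decide (3 ≤ N) || (!S && decide (18 ≤ L) && D && A)) := by
  by_cases h24 : 24 ≤ L <;> by_cases h18 : 18 ≤ L <;> by_cases h3 : (3:Int) ≤ N <;>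
    cases W <;> cases S <;> cases D <;> cases A <;> simp [h24, h18, h3]

-- ===== VERDICT (by name: the statement is the Claim_ definition above) =====
theorem is_messy_name_spec : Claim_equal_is_messy_name := by
  intro stem _
  unfold Spec_is_messy_name is_messy_name is_messy_name_alt
  simp only [pvFold_spec]
  by_cases hnil : stem.toList = []
  · simp [hnil]
  · rw [if_neg hnil, if_neg hnil]
    have hsep : ("_-. ".toList.any fun c => PySem.Chars.isIn [c] stem.toList)
        = stem.toList.any (fun c => "_-. ".toList.contains c) := by
      simp only [pvSingleton_isIn_iff]
      exact pvAny_mem_comm _ _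
    have hw : (stem.toList.any fun c => PySem.Set.contains (PySem.Set.ofList "!*=+@#$%^&()[]{};,'`~<>|\\".toList) c)
        = stem.toList.any (fun c => "!*=+@#$%^&()[]{};,'`~<>|\\".toList.contains c) := by
      refine PySem.List.any_congr_mem (fun c _ => ?_)
      simp [PySem.Set.contains, List.contains_eq_mem, PySem.Set.mem_ofList]
    have hn : (stem.toList.map (fun c => if (!PySem.Chars.isalnum c) && (!PySem.Set.contains (PySem.Set.ofList "_-. ".toList) c) then (1:Int) else 0)).sum
        = (stem.toList.map (fun c => if (!PySem.Chars.isalnum c) && !("_-. ".toList.contains c) then (1:Int) else 0)).sum := by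
      refine congrArg List.sum (List.map_congr_left (fun c _ => ?_))
      have h : PySem.Set.contains (PySem.Set.ofList "_-. ".toList) c = "_-. ".toList.contains c := by
        simp [PySem.Set.contains, List.contains_eq_mem, PySem.Set.mem_ofList]
      rw [h]
    rw [hsep, hw, hn]
    simp only [Bool.false_or, zero_add]
    exact pvCombine stem.toList.length _ _ _ _ _
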